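-- pv_equiv track=rewrite | github.com/arthurzengg/coding_q | Tiktok/q1.py | getTotalImpact
-- ===== SOURCE A (Python) =====
-- def getTotalImpact(initialReelImpacts, newReelImpacts, k):
--     import heapq
--
--     # Initialize heap with k largest elements from initialReelImpacts
--     initialReelImpacts.sort(reverse=True)
--     heap = []
--     total_reels = len(initialReelImpacts)
--     for impact in initialReelImpacts[:k]:
--         heapq.heappush(heap, impact)
--
--     # Initialize total impact score
--     if total_reels >= k:
--         impact_score = heap[0]
--     else:
--         impact_score = 0
--
--     # Process each day
--     for new_impact in newReelImpacts:
--         total_reels += 1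
--         if len(heap) < k:
--             heapq.heappush(heap, new_impact)
--         else:
--             if new_impact > heap[0]:
--                 heapq.heapreplace(heap, new_impact)
--         if total_reels >= k:
--             impact_score += heap[0]
--
--     return impact_score
-- ===== SOURCE B (Python) =====
-- def getTotalImpact(initialReelImpacts, newReelImpacts, k):
--     # One ascending-sorted pool of everything seen; the kth largest is read
--     # by position len(pool)-k, updated by a single ordered insertion per day.
--     pool = sorted(initialReelImpacts)
--     score = pool[len(pool) - k] if len(pool) >= k else 0
--     for x in newReelImpacts:
--         i = len(pool)
--         while i > 0 and pool[i - 1] > x: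
--             i -= 1
--         pool.insert(i, x)
--         if len(pool) >= k:
--             score += pool[len(pool) - k]
--     return score
-- ===== Notes on version B (the rewrite author's own statement) =====
-- stated objective: alternative
-- what changed: A seeds a k-element heap from a descending sort and per day conditionally heappush/heapreplaces before reading heap[0]; B keeps one ascending-sorted pool of everything seen, does one unconditional ordered insertion per day and reads the kth largest directly by position len(pool)-k.
-- outside the precondition, e.g. on getTotalImpact([5, 3, 1], [2], -1): A returns 6, B raises IndexError
import Mathlib
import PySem

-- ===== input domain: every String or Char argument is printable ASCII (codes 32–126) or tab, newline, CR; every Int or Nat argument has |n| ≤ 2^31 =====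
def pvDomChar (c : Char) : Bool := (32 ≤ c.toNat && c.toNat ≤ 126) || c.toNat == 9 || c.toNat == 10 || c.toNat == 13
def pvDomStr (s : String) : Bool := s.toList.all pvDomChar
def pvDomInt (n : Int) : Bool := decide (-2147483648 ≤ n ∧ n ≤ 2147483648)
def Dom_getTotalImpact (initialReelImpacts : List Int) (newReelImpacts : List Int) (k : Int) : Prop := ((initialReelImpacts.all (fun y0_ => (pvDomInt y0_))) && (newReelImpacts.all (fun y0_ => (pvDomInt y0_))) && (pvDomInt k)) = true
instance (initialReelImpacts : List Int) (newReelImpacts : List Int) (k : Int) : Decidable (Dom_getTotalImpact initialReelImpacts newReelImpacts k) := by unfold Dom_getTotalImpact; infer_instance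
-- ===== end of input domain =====

-- B replaces A's per-day heap bookkeeping (seed-with-k-largest, conditional push/replace) by one
-- ascending-sorted pool of everything seen, reading the kth largest by position (objective:
-- alternative — same O(n·k)-ish cost, plainly different bookkeeping).  Equivalence is about the
-- RETURN value only: Python A sorts initialReelImpacts in place, Python B leaves it untouched.

-- ===== PORT A =====
-- heapq maintains a binary min-heap; getTotalImpact observes the heap only through len(heap),
-- heap[0] (its minimum) and its multiset of elements.  The heap is ported as the ascending-sorted
-- list with the same elements: heappush = ordered insert, heapreplace = drop the minimum then
-- ordered insert.  This realises the same len / heap[0] / multiset at every step, hence the same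
-- value of the function on every input; the internal array order (never observed) is not modelled.
def pvHeapPush (heap : List Int) (x : Int) : List Int :=
  match heap with
  | [] => [x]
  | h :: t => if x < h then x :: h :: t else h :: pvHeapPush t x

def pvHeapReplace (heap : List Int) (x : Int) : List Int :=
  pvHeapPush heap.tail x

-- one iteration of A's `for new_impact in newReelImpacts` loop; state = (total_reels, heap, impact_score)
def pvStepA (k : Int) (st : Int × List Int × Int) (x : Int) : Int × List Int × Int :=
  let total := st.1 + 1
  let heap := st.2.1
  let heap' := if (heap.length : Int) < k then pvHeapPush heap x
               else if x > (PySem.List.pyGet? heap 0).getD 0 then pvHeapReplace heap x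
               else heap
  -- `.getD 0` : heap[0] is an IndexError on an empty heap; Pre_ (1 ≤ k) keeps those inputs out
  let score := if total ≥ k then st.2.2 + (PySem.List.pyGet? heap' 0).getD 0 else st.2.2
  (total, heap', score)

def getTotalImpact (initialReelImpacts : List Int) (newReelImpacts : List Int) (k : Int) : Int :=
  let sortedInit := PySem.List.sorted initialReelImpacts (fun y => y) true   -- .sort(reverse=True)
  let heap := (PySem.List.slice sortedInit none (some k)).foldl pvHeapPush []  -- initialReelImpacts[:k]
  let total : Int := (initialReelImpacts.length : Int)
  let score : Int := if total ≥ k then (PySem.List.pyGet? heap 0).getD 0 else 0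
  (newReelImpacts.foldl (pvStepA k) (total, heap, score)).2.2

-- ===== PORT B =====
-- the `while i > 0 and pool[i - 1] > x: i -= 1` scan, run from i = len(pool)
def pvInsPos (pool : List Int) (x : Int) : Nat → Nat
  | 0 => 0
  | i + 1 => if x < pool.getD i 0 then pvInsPos pool x i else i + 1

-- one iteration of B's loop; state = (pool, score)
def pvStepB (k : Int) (st : List Int × Int) (x : Int) : List Int × Int :=
  let pool := PySem.List.insert st.1 ((pvInsPos st.1 x st.1.length : Nat) : Int) x
  let score := if (pool.length : Int) ≥ k then
      st.2 + (PySem.List.pyGet? pool ((pool.length : Int) - k)).getD 0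
    else st.2
  (pool, score)

def getTotalImpact_alt (initialReelImpacts : List Int) (newReelImpacts : List Int) (k : Int) : Int :=
  let pool := PySem.List.sorted initialReelImpacts (fun y => y) false   -- sorted(initialReelImpacts)
  let score : Int := if (pool.length : Int) ≥ k then
      (PySem.List.pyGet? pool ((pool.length : Int) - k)).getD 0
    else 0
  (newReelImpacts.foldl (pvStepB k) (pool, score)).2

-- ===== PRECONDITION & SPEC =====
-- Pre_ restricts to the natural domain k ≥ 1 (a positive count of top reels): for k = 0 A raises
-- IndexError (heap[0] on the empty heap), and for negative k A's value is an accident of Python's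
-- negative-slice/heap interplay on which B itself raises IndexError.
def Pre_getTotalImpact (initialReelImpacts : List Int) (newReelImpacts : List Int) (k : Int) : Prop := 1 ≤ k
instance (initialReelImpacts : List Int) (newReelImpacts : List Int) (k : Int) : Decidable (Pre_getTotalImpact initialReelImpacts newReelImpacts k) := by unfold Pre_getTotalImpact; infer_instance

def pvWitness_getTotalImpact : List Int × List Int × Int := ([3, 1, 4], [2, 5], 2)

def Spec_getTotalImpact (initialReelImpacts : List Int) (newReelImpacts : List Int) (k : Int) (out : Int) : Prop := out = getTotalImpact_alt initialReelImpacts newReelImpacts k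
instance (initialReelImpacts : List Int) (newReelImpacts : List Int) (k : Int) (out : Int) : Decidable (Spec_getTotalImpact initialReelImpacts newReelImpacts k out) := by unfold Spec_getTotalImpact; infer_instance

-- ===== CLAIM (what is proved, stated in full; the proofs are below) =====
def Claim_equal_getTotalImpact : Prop := ∀ (initialReelImpacts : List Int) (newReelImpacts : List Int) (k : Int), Dom_getTotalImpact initialReelImpacts newReelImpacts k → Pre_getTotalImpact initialReelImpacts newReelImpacts k → Spec_getTotalImpact initialReelImpacts newReelImpacts k (getTotalImpact initialReelImpacts newReelImpacts k)

-- ===== LEMMAS AND PROOFS =====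

-- the insertion point of the ordered insert pvHeapPush
def pvOiIdx (x : Int) (l : List Int) : Nat := l.findIdx (fun y => decide (x < y))

lemma pvHeapPush_split (x : Int) (l : List Int) :
    pvHeapPush l x = l.take (pvOiIdx x l) ++ x :: l.drop (pvOiIdx x l) := by
  induction l with
  | nil => rfl
  | cons h t ih =>
    by_cases hx : x < h
    · simp [pvHeapPush, pvOiIdx, List.findIdx_cons, hx]
    · simp [pvHeapPush, pvOiIdx, List.findIdx_cons, hx] at ih ⊢
      exact ih

lemma pvOiIdx_le (x : Int) (l : List Int) : pvOiIdx x l ≤ l.length :=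
  List.findIdx_le_length

lemma pvHeapPush_perm (x : Int) (l : List Int) : (pvHeapPush l x).Perm (x :: l) := by
  rw [pvHeapPush_split]
  calc (l.take (pvOiIdx x l) ++ x :: l.drop (pvOiIdx x l)).Perm
        (x :: (l.take (pvOiIdx x l) ++ l.drop (pvOiIdx x l))) := List.perm_middle
    _ = (x :: l) := by rw [List.take_append_drop]

lemma pvHeapPush_length (x : Int) (l : List Int) : (pvHeapPush l x).length = l.length + 1 := by
  simpa using (pvHeapPush_perm x l).length_eq

lemma pvSorted_mono {l : List Int} (hs : l.Pairwise (· ≤ ·)) {i j : Nat}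
    (hij : i ≤ j) (hj : j < l.length) : l[i]'(by omega) ≤ l[j] := by
  rcases Nat.lt_or_ge i j with h | h
  · exact (List.pairwise_iff_getElem.mp hs) i j (by omega) hj h
  · have : i = j := by omega
    subst this; exact le_refl _

lemma pvHeapPush_sorted {l : List Int} (x : Int) (hs : l.Pairwise (· ≤ ·)) :
    (pvHeapPush l x).Pairwise (· ≤ ·) := by
  induction l with
  | nil => simp [pvHeapPush]
  | cons h t ih =>
    rcases List.pairwise_cons.mp hs with ⟨hht, hts⟩
    by_cases hx : x < h
    · simp only [pvHeapPush, if_pos hx]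
      refine List.pairwise_cons.mpr ⟨?_, hs⟩
      intro y hy
      rcases List.mem_cons.mp hy with hy | hy
      · omega
      · exact le_trans (le_of_lt hx) (hht y hy)
    · simp only [pvHeapPush, if_neg hx]
      refine List.pairwise_cons.mpr ⟨?_, ih hts⟩
      intro y hy
      rcases List.mem_cons.mp ((pvHeapPush_perm x t).mem_iff.mp hy) with hy | hy
      · subst hy; exact le_of_not_gt hx
      · exact hht y hy

-- elements strictly before the insertion point are ≤ x; the element at it (if any) is > x
lemma pvOiIdx_before (x : Int) (l : List Int) {j : Nat} (hj : j < pvOiIdx x l)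
    (hjl : j < l.length) : l[j] ≤ x := by
  have := List.not_of_lt_findIdx (p := fun y => decide (x < y)) (xs := l) (i := j) hj
  simp at this
  exact this

lemma pvOiIdx_at (x : Int) (l : List Int) (h : pvOiIdx x l < l.length) :
    x < l[pvOiIdx x l] := by
  have := List.findIdx_getElem (p := fun y => decide (x < y)) (xs := l) (w := h)
  simpa using this

-- lower bound on the insertion point from a dominated element
lemma pvOiIdx_lb {x : Int} {l : List Int} (hs : l.Pairwise (· ≤ ·)) {m : Nat}
    (hm : m < l.length) (hx : l[m] < x) : m + 1 ≤ pvOiIdx x l := by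
  by_contra hc
  have h1 : pvOiIdx x l ≤ m := by omega
  have h2 : pvOiIdx x l < l.length := by omega
  have := pvSorted_mono hs h1 hm
  have := pvOiIdx_at x l h2
  omega

-- B's right-to-left scan finds exactly the ordered-insert position
lemma pvInsPos_eq_aux {x : Int} {l : List Int} (hs : l.Pairwise (· ≤ ·)) :
    ∀ i, i ≤ l.length → (∀ j, i ≤ j → (hj : j < l.length) → x < l[j]) →
      pvOiIdx x l ≤ i → pvInsPos l x i = pvOiIdx x l := by
  intro i
  induction i with
  | zero => intro _ _ hq; simp [pvInsPos]; omega
  | succ i ih =>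
    intro hi hH hq
    have hil : i < l.length := by omega
    have hgetD : l.getD i 0 = l[i] := List.getD_eq_getElem l 0 hil
    by_cases hx : x < l.getD i 0
    · have hxi : x < l[i] := by rw [hgetD] at hx; exact hx
      have hq' : pvOiIdx x l ≤ i := by
        by_contra hc
        have : i < pvOiIdx x l := by omega
        have := pvOiIdx_before x l this hil
        omega
      simp only [pvInsPos, if_pos hx]
      exact ih (by omega) (fun j hj hjl => by
        rcases Nat.eq_or_lt_of_le hj with h | h
        · subst h; exact hxi
        · exact hH j (by omega) hjl) hq'
    · have hxi : ¬ x < l[i] := by rw [hgetD] at hx; exact hx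
      simp only [pvInsPos, if_neg hx]
      rcases Nat.eq_or_lt_of_le hq with h | h
      · omega
      · exfalso
        have hqi : pvOiIdx x l ≤ i := by omega
        have hql : pvOiIdx x l < l.length := by omega
        have := pvOiIdx_at x l hql
        have := pvSorted_mono hs hqi hil
        omega

lemma pvInsPos_eq {x : Int} {l : List Int} (hs : l.Pairwise (· ≤ ·)) :
    pvInsPos l x l.length = pvOiIdx x l := by
  exact pvInsPos_eq_aux hs l.length (le_refl _) (fun j hj hjl => by omega) (pvOiIdx_le x l)

-- B's insertion step IS the ordered insert
lemma pvInsert_eq_push {x : Int} {l : List Int} (hs : l.Pairwise (· ≤ ·)) :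
    PySem.List.insert l ((pvInsPos l x l.length : Nat) : Int) x = pvHeapPush l x := by
  rw [pvInsPos_eq hs, PySem.List.insert_natCast l _ x (pvOiIdx_le x l), pvHeapPush_split]

lemma pvDrop_sorted {l : List Int} (hs : l.Pairwise (· ≤ ·)) (n : Nat) :
    (l.drop n).Pairwise (· ≤ ·) := List.Pairwise.drop hs

-- ===== the heap ↔ sorted-pool correspondence =====

-- dropping past the insertion point: the inserted element is among the kept suffix
lemma pvDropPush_perm_high (x : Int) (pool : List Int) {i : Nat}
    (h : i ≤ pvOiIdx x pool) :
    ((pvHeapPush pool x).drop i).Perm (x :: pool.drop i) := by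
  have hp : pvOiIdx x pool ≤ pool.length := pvOiIdx_le x pool
  have hlt : (pool.take (pvOiIdx x pool)).length = pvOiIdx x pool :=
    List.length_take_of_le hp
  rw [pvHeapPush_split, List.drop_append_of_le_length (by omega)]
  calc ((pool.take (pvOiIdx x pool)).drop i ++ x :: pool.drop (pvOiIdx x pool)).Perm
        (x :: ((pool.take (pvOiIdx x pool)).drop i ++ pool.drop (pvOiIdx x pool))) :=
      List.perm_middle
    _ = x :: (pool.take (pvOiIdx x pool) ++ pool.drop (pvOiIdx x pool)).drop i := by
      rw [List.drop_append_of_le_length (by omega)]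
    _ = x :: pool.drop i := by rw [List.take_append_drop]

-- dropping strictly below the insertion point: the inserted element is discarded, indices shift
lemma pvDropPush_low (x : Int) (pool : List Int) {i : Nat}
    (hq : pvOiIdx x pool ≤ i) :
    (pvHeapPush pool x).drop (i + 1) = pool.drop i := by
  have hp : pvOiIdx x pool ≤ pool.length := pvOiIdx_le x pool
  have hlt : (pool.take (pvOiIdx x pool)).length = pvOiIdx x pool :=
    List.length_take_of_le hp
  rw [pvHeapPush_split]
  have h1 : i + 1 = (pool.take (pvOiIdx x pool)).length + (i + 1 - pvOiIdx x pool) := by omega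
  rw [h1, List.drop_length_add_append]
  have h2 : i + 1 - pvOiIdx x pool = (i - pvOiIdx x pool) + 1 := by omega
  rw [h2, List.drop_succ_cons]
  rw [List.drop_drop]
  congr 1
  omega

-- the heap after one A-step, related to the grown pool
lemma pvHeapStep {k : Int} (hk : 1 ≤ k) {pool : List Int} (hs : pool.Pairwise (· ≤ ·)) (x : Int) :
    (if ((pool.drop (pool.length - k.toNat)).length : Int) < k then
        pvHeapPush (pool.drop (pool.length - k.toNat)) x
      else if x > (PySem.List.pyGet? (pool.drop (pool.length - k.toNat)) 0).getD 0 then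
        pvHeapReplace (pool.drop (pool.length - k.toNat)) x
      else pool.drop (pool.length - k.toNat))
    = (pvHeapPush pool x).drop ((pvHeapPush pool x).length - k.toNat) := by
  have hkn : 1 ≤ k.toNat := by omega
  have hknk : (k.toNat : Int) = k := Int.toNat_of_nonneg (by omega)
  have hlen' : (pvHeapPush pool x).length = pool.length + 1 := pvHeapPush_length x pool
  by_cases hnk : pool.length < k.toNat
  · -- heap holds everything; one plain push
    have h0 : pool.length - k.toNat = 0 := by omega
    have h0' : (pvHeapPush pool x).length - k.toNat = 0 := by omega
    rw [h0, h0', List.drop_zero, List.drop_zero, if_pos (show ((pool.length : Int)) < k by omega)]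
  · -- heap is full (length k)
    have hnk' : k.toNat ≤ pool.length := by omega
    set idx := pool.length - k.toNat with hidx_def
    have hidx : idx < pool.length := by omega
    have hdropc : pool.drop idx = pool[idx] :: pool.drop (idx + 1) :=
      List.drop_eq_getElem_cons hidx
    have hheaplen : (pool.drop idx).length = k.toNat := by
      rw [List.length_drop]; omega
    have hcond : ¬ ((pool.drop idx).length : Int) < k := by
      rw [hheaplen, hknk]; omega
    have hget : (PySem.List.pyGet? (pool.drop idx) 0).getD 0 = pool[idx] := by
      rw [hdropc, PySem.List.pyGet?_zero_cons]; rfl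
    have hlen'' : (pvHeapPush pool x).length - k.toNat = idx + 1 := by omega
    rw [if_neg hcond, hget, hlen'']
    have hsort' : (pvHeapPush pool x).Pairwise (· ≤ ·) := pvHeapPush_sorted x hs
    by_cases hx : x > pool[idx]
    · -- new element beats the heap minimum: replace
      have hp : idx + 1 ≤ pvOiIdx x pool := pvOiIdx_lb hs hidx hx
      have htail : (pool.drop idx).tail = pool.drop (idx + 1) := by rw [hdropc]; rfl
      rw [if_pos hx]
      unfold pvHeapReplace
      rw [htail]
      apply PySem.List.eq_of_perm_of_pairwise_le
      · -- perm via x :: pool.drop (idx+1)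
        exact (pvHeapPush_perm x _).trans (pvDropPush_perm_high x pool hp).symm
      · exact pvHeapPush_sorted x (pvDrop_sorted hs _)
      · exact pvDrop_sorted hsort' _
    · -- heap unchanged
      rw [if_neg hx]
      by_cases hq : pvOiIdx x pool ≤ idx
      · rw [pvDropPush_low x pool hq]
      · have hqi : idx < pvOiIdx x pool := by omega
        have hle : pool[idx] ≤ x := pvOiIdx_before x pool hqi hidx
        have hxe : x = pool[idx] := by omega
        apply PySem.List.eq_of_perm_of_pairwise_le
        · rw [hdropc, ← hxe]
          exact (pvDropPush_perm_high x pool (by omega)).symm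
        · exact pvDrop_sorted hs _
        · exact pvDrop_sorted hsort' _

-- reading the heap minimum = reading the kth largest by position
lemma pvKth (k : Int) (hk : 1 ≤ k) (l : List Int) (hge : (l.length : Int) ≥ k) :
    (PySem.List.pyGet? (l.drop (l.length - k.toNat)) 0).getD 0
      = (PySem.List.pyGet? l ((l.length : Int) - k)).getD 0 := by
  have hknk : (k.toNat : Int) = k := Int.toNat_of_nonneg (by omega)
  rw [PySem.List.pyGet?_zero, List.getElem?_drop,
    show PySem.List.pyGet? l ((l.length : Int) - k) = l[((l.length : Int) - k).toNat]? from
      PySem.List.pyGet?_of_nonneg l (by omega)]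
  have h1 : ((l.length : Int) - k).toNat = l.length - k.toNat + 0 := by omega
  rw [h1]

-- one step of A from the related state equals one step of B, re-related
lemma pvStep_rel {k : Int} (hk : 1 ≤ k) {pool : List Int} (hs : pool.Pairwise (· ≤ ·)) (s x : Int) :
    pvStepA k ((pool.length : Int), pool.drop (pool.length - k.toNat), s) x
      = (((pvStepB k (pool, s) x).1.length : Int),
         (pvStepB k (pool, s) x).1.drop ((pvStepB k (pool, s) x).1.length - k.toNat),
         (pvStepB k (pool, s) x).2) := by
  have hknk : (k.toNat : Int) = k := Int.toNat_of_nonneg (by omega)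
  have hB1 : PySem.List.insert pool ((pvInsPos pool x pool.length : Nat) : Int) x
      = pvHeapPush pool x := pvInsert_eq_push hs
  have hlen' : (pvHeapPush pool x).length = pool.length + 1 := pvHeapPush_length x pool
  simp only [pvStepA, pvStepB, hB1]
  rw [pvHeapStep hk hs x]
  refine Prod.ext (by push_cast [hlen']; ring) (Prod.ext rfl ?_)
  simp only [hlen']
  by_cases hge : (pool.length : Int) + 1 ≥ k
  · rw [if_pos hge, if_pos (by push_cast; omega)]
    have := pvKth k hk (pvHeapPush pool x) (by rw [hlen']; push_cast; omega)
    rw [hlen'] at this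
    rw [this]
  · rw [if_neg hge, if_neg (by push_cast; omega)]

lemma pvLoop_rel {k : Int} (hk : 1 ≤ k) (new : List Int) :
    ∀ (pool : List Int) (s : Int), pool.Pairwise (· ≤ ·) →
      (new.foldl (pvStepA k) ((pool.length : Int), pool.drop (pool.length - k.toNat), s)).2.2
        = (new.foldl (pvStepB k) (pool, s)).2 := by
  induction new with
  | nil => intro pool s _; rfl
  | cons x t ih =>
    intro pool s hs
    have hB1 : (pvStepB k (pool, s) x).1 = pvHeapPush pool x := by
      simp [pvStepB, pvInsert_eq_push hs]
    have hsorted' : ((pvStepB k (pool, s) x).1).Pairwise (· ≤ ·) := by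
      rw [hB1]; exact pvHeapPush_sorted x hs
    simp only [List.foldl_cons]
    rw [pvStep_rel hk hs s x]
    exact ih _ _ hsorted'

-- sorting descending is the reverse of sorting ascending (Int values: equal keys are equal)
lemma pvSortDesc (l : List Int) :
    PySem.List.sorted l (fun y => y) true = (PySem.List.sorted l (fun y => y) false).reverse := by
  have h : (PySem.List.sorted l (fun y => y) true).reverse
      = PySem.List.sorted l (fun y => y) false := by
    apply PySem.List.eq_of_perm_of_pairwise_le
    · exact ((List.reverse_perm _).trans (PySem.List.sorted_perm l _ true)).trans
        (PySem.List.sorted_perm l _ false).symm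
    · rw [List.pairwise_reverse]
      have := PySem.List.sorted_pairwise_rev l (fun y => y)
      exact this.imp (fun h => h)
    · have := PySem.List.sorted_pairwise l (fun y => y)
      exact this.imp (fun h => h)
  rw [← h, List.reverse_reverse]

-- folding heappush over a list: sorted result, permutation of the inputs
lemma pvFoldPush (l : List Int) :
    ∀ acc : List Int, acc.Pairwise (· ≤ ·) →
      (l.foldl pvHeapPush acc).Pairwise (· ≤ ·) ∧ (l.foldl pvHeapPush acc).Perm (acc ++ l) := by
  induction l with
  | nil => intro acc ha; simpa using ha
  | cons x t ih =>
    intro acc ha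
    rcases ih (pvHeapPush acc x) (pvHeapPush_sorted x ha) with ⟨h1, h2⟩
    exact ⟨h1, h2.trans (((pvHeapPush_perm x acc).append_right t).trans List.perm_middle.symm)⟩

-- initial states are related
lemma pvInit_rel {k : Int} (hk : 1 ≤ k) (initial : List Int) :
    (PySem.List.slice (PySem.List.sorted initial (fun y => y) true) none (some k)).foldl pvHeapPush []
      = (PySem.List.sorted initial (fun y => y) false).drop
          ((PySem.List.sorted initial (fun y => y) false).length - k.toNat) := by
  have hknk : (k.toNat : Int) = k := Int.toNat_of_nonneg (by omega)
  have hs : (PySem.List.sorted initial (fun y => y) false).Pairwise (· ≤ ·) :=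
    (PySem.List.sorted_pairwise initial (fun y => y)).imp (fun h => h)
  rw [pvSortDesc,
    show PySem.List.slice ((PySem.List.sorted initial (fun y => y) false).reverse) none (some k)
        = ((PySem.List.sorted initial (fun y => y) false).reverse).take k.toNat from
      PySem.List.slice_to _ (by omega),
    List.take_reverse]
  rcases pvFoldPush ((PySem.List.sorted initial (fun y => y) false).drop
      ((PySem.List.sorted initial (fun y => y) false).length - k.toNat)).reverse []
      (by simp) with ⟨h1, h2⟩
  apply PySem.List.eq_of_perm_of_pairwise_le
  · exact (h2.trans (by simp [List.reverse_perm]))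
  · exact h1
  · exact pvDrop_sorted hs _

-- ===== VERDICT (by name: the statement is the Claim_ definition above) =====
theorem getTotalImpact_spec : Claim_equal_getTotalImpact := by
  intro initial new k _ hk
  simp only [Spec_getTotalImpact, getTotalImpact, getTotalImpact_alt]
  have hs : (PySem.List.sorted initial (fun y => y) false).Pairwise (· ≤ ·) := by
    simpa using PySem.List.sorted_pairwise initial (fun y => y)
  have hlen : (PySem.List.sorted initial (fun y => y) false).length = initial.length :=
    PySem.List.length_sorted initial (fun y => y) false
  have hscore : (if ((PySem.List.sorted initial (fun y => y) false).length : Int) ≥ k then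
        (PySem.List.pyGet? ((PySem.List.sorted initial (fun y => y) false).drop
          ((PySem.List.sorted initial (fun y => y) false).length - k.toNat)) 0).getD 0 else 0)
      = (if ((PySem.List.sorted initial (fun y => y) false).length : Int) ≥ k then
        (PySem.List.pyGet? (PySem.List.sorted initial (fun y => y) false)
          (((PySem.List.sorted initial (fun y => y) false).length : Int) - k)).getD 0 else 0) := by
    by_cases hge : ((PySem.List.sorted initial (fun y => y) false).length : Int) ≥ k
    · rw [if_pos hge, if_pos hge, pvKth k hk _ hge]
    · rw [if_neg hge, if_neg hge]
  rw [pvInit_rel hk initial, ← hlen, hscore]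
  exact pvLoop_rel hk new _ _ hs
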